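-- pv_equiv track=rewrite | github.com/akashprap/Coding-Problems | Medium/Prefix Suffix String/prefix-suffix-string.py | prefixSuffixString
-- ===== SOURCE A (Python) =====
-- from typing import List
--
-- class Node:
--     def __init__(self):
--         self.child = [None] * 26
--
-- def insert(s, root):
--     for i in range(len(s)):
--         if root.child[ord(s[i]) - ord('a')]:
--             root = root.child[ord(s[i]) - ord('a')]
--         else:
--             root.child[ord(s[i]) - ord('a')] = Node()
--             root = root.child[ord(s[i]) - ord('a')]
--
-- def find(root, s):
--     for i in range(len(s)):
--         if root.child[ord(s[i]) - ord('a')]: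
--             root = root.child[ord(s[i]) - ord('a')]
--         else:
--             return False
--     return True
--
-- def prefixSuffixString(s1: List[str], s2: List[str]) -> int:
--     t1, t2 = Node(), Node()
--     for it in s1:
--         insert(it, t1)
--         insert(it[::-1], t2)
--
--     cnt = 0
--     for it in s2:
--         ok = False
--         if find(t1, it) or find(t2, it[::-1]):
--             cnt += 1
--     return cnt
-- ===== SOURCE B (Python) =====
-- from typing import List
--
-- def prefixSuffixString(s1: List[str], s2: List[str]) -> int:
--     # hash sets of all prefixes and all suffixes (the empty string matches always)
--     prefixes = {""}
--     suffixes = {""}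
--     for s in s1:
--         for i in range(len(s)):
--             prefixes.add(s[:i + 1])
--             suffixes.add(s[i:])
--     return sum(1 for q in s2 if q in prefixes or q in suffixes)
-- ===== Notes on version B (the rewrite author's own statement) =====
-- stated objective: simpler
-- what changed: Replaces the two hand-built pointer tries and per-query character-by-character trie walks with two hash sets holding every prefix and every suffix of the s1 strings, counting queries by set membership (C-level hashing instead of Python-level per-character node hops).
-- intended difference: On inputs where some s2 query is a prefix/suffix of an s1 string only via Python's negative-index wraparound (child[ord(c)-97] aliasing characters whose codes agree mod 26, e.g. 'G' with 'a'), A counts that query while B counts only literal prefix/suffix matches, the intended behaviour; e.g. A(['ab'],['G'])=1 but B returns 0. — e.g. on prefixSuffixString(["ab"], ["G"]): A returns 1, B returns 0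
import Mathlib
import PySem

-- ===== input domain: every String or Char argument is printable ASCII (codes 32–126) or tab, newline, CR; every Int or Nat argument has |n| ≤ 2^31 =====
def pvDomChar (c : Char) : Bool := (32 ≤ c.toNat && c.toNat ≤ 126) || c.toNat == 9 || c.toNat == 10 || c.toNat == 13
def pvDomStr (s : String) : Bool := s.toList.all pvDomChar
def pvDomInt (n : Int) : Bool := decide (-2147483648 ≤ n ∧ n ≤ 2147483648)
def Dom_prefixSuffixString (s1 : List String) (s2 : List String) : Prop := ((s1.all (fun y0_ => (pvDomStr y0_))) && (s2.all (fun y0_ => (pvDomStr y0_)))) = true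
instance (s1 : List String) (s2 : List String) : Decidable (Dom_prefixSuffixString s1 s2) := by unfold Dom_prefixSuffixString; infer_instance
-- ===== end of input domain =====

-- B replaces A's two hand-built pointer tries and per-query trie walks with two sets
-- holding every prefix and every suffix of the s1 strings, counting queries by membership
-- (objective: simpler). On queries that A matches only through Python's negative-index
-- wraparound, B counts the literal (intended) matches instead — see D_ below.

-- ===== PORT A =====
-- A's mutable pointer trie is encoded by the set of its node paths: the trie is an
-- unshared tree, so a node is identified by its path from the root (list of child
-- indices), and "root.child[i] is not None" at node p is exactly "p ++ [i] is a node".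
-- Python's child index is ord(c) - ord('a') into the 26-slot child list; Python resolves
-- a negative index -k as slot 26-k, so for the codes 71..122 the reached slot is
-- (ord(c) - 97) mod 26 = (ord(c) + 7) % 26 (a reached code outside 71..122 raises
-- IndexError in Python and is excluded by Pre_; pvIdx's value there is irrelevant).
def pvIdx (c : Char) : Nat := (c.toNat + 7) % 26

def pvInsert (nodes : List (List Nat)) (cur : List Nat) : List Char → List (List Nat)
  | [] => nodes
  | c :: cs =>
    let p := cur ++ [pvIdx c]
    if p ∈ nodes then pvInsert nodes p cs
    else pvInsert (nodes ++ [p]) p cs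

def pvFind (nodes : List (List Nat)) (cur : List Nat) : List Char → Bool
  | [] => true
  | c :: cs =>
    let p := cur ++ [pvIdx c]
    if p ∈ nodes then pvFind nodes p cs else false

def prefixSuffixString (s1 : List String) (s2 : List String) : Int :=
  let ts := s1.foldl
    (fun (t : List (List Nat) × List (List Nat)) it =>
      (pvInsert t.1 [] it.toList, pvInsert t.2 [] it.toList.reverse))
    ([[]], [[]])
  s2.foldl
    (fun cnt it =>
      if pvFind ts.1 [] it.toList || pvFind ts.2 [] it.toList.reverse then cnt + 1 else cnt)
    0

-- ===== PORT B =====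
def prefixSuffixString_alt (s1 : List String) (s2 : List String) : Int :=
  let sets := s1.foldl
    (fun (acc : PySem.Set String × PySem.Set String) s =>
      (List.range s.toList.length).foldl
        (fun (acc : PySem.Set String × PySem.Set String) i =>
          (PySem.Set.add acc.1 (String.ofList (s.toList.take (i + 1))),
           PySem.Set.add acc.2 (String.ofList (s.toList.drop i))))
        acc)
    (PySem.Set.ofList [""], PySem.Set.ofList [""])
  ((s2.countP (fun q => PySem.Set.contains sets.1 q || PySem.Set.contains sets.2 q) : Nat) : Int)

-- ===== PRECONDITION & SPEC =====
-- Pre_ excludes exactly the inputs on which Python A raises IndexError: a character code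
-- outside 71..122 that one of the two trie walks actually reaches. A reaches it iff every
-- earlier character's (wrapped) slot extends some inserted word, so Pre_ demands: all s1
-- codes in 71..122, and each query either all in 71..122 or stopped (forwards and
-- backwards) strictly before its first out-of-range character.
def pvIn26 (c : Char) : Bool := 71 ≤ c.toNat && c.toNat ≤ 122

-- two characters land in the same trie slot iff their codes are congruent mod 26
def pvAliasPre (q w : List Char) : Bool :=
  match q, w with
  | [], _ => true
  | _ :: _, [] => false
  | c :: cs, d :: ds => (c.toNat % 26 == d.toNat % 26) && pvAliasPre cs ds

def pvStopB (ws : List (List Char)) (ql : List Char) : Bool :=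
  let good := ql.takeWhile (fun c => pvIn26 c)
  !good.isEmpty && ws.all (fun w => !pvAliasPre good w)

def pvQSafe (s1 : List String) (q : String) : Bool :=
  q.toList.all pvIn26 ||
  (pvStopB (s1.map (fun s => s.toList)) q.toList &&
   pvStopB (s1.map (fun s => s.toList.reverse)) q.toList.reverse)

def Pre_prefixSuffixString (s1 : List String) (s2 : List String) : Prop :=
  (s1.all (fun s => s.toList.all pvIn26) && s2.all (fun q => pvQSafe s1 q)) = true
instance (s1 : List String) (s2 : List String) : Decidable (Pre_prefixSuffixString s1 s2) := by
  unfold Pre_prefixSuffixString; infer_instance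

def pvWitness_prefixSuffixString : List String × List String := (["ab", "c"], ["a", "b", "", "bc"])

-- On inputs where some s2 query is a prefix/suffix of an s1 string only under Python's
-- negative-index wraparound (which aliases characters whose codes agree mod 26, e.g.
-- 'G' and 'a'), A counts that query although it is not literally a prefix or suffix of
-- any s1 string, while B counts only literal matches — the intended behaviour, since
-- the aliasing is an indexing accident.
def pvSlots (q : String) : List Nat := q.toList.map (fun c => c.toNat % 26)

def D_prefixSuffixString (s1 : List String) (s2 : List String) : Prop :=
  ∃ q ∈ s2, ∃ w ∈ s1,
    (pvSlots q <+: pvSlots w ∨ pvSlots q <:+ pvSlots w) ∧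
    ∀ v ∈ s1, ¬ q.toList <+: v.toList ∧ ¬ q.toList <:+ v.toList
instance (s1 : List String) (s2 : List String) : Decidable (D_prefixSuffixString s1 s2) := by
  unfold D_prefixSuffixString; infer_instance

def Spec_prefixSuffixString (s1 : List String) (s2 : List String) (out : Int) : Prop :=
  ¬ D_prefixSuffixString s1 s2 → out = prefixSuffixString_alt s1 s2
instance (s1 : List String) (s2 : List String) (out : Int) : Decidable (Spec_prefixSuffixString s1 s2 out) := by unfold Spec_prefixSuffixString; infer_instance

def pvDiffWitness_prefixSuffixString : List String × List String := (["ab"], ["G"])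
def pvDiffWitnessOut_prefixSuffixString : Int × Int := (1, 0)

-- ===== CLAIM (what is proved, stated in full; the proofs are below) =====
def Claim_unchanged_prefixSuffixString : Prop := ∀ (s1 : List String) (s2 : List String), Dom_prefixSuffixString s1 s2 → Pre_prefixSuffixString s1 s2 → Spec_prefixSuffixString s1 s2 (prefixSuffixString s1 s2)
def Claim_changed_prefixSuffixString : Prop := Dom_prefixSuffixString (pvDiffWitness_prefixSuffixString.1) (pvDiffWitness_prefixSuffixString.2) ∧ Pre_prefixSuffixString (pvDiffWitness_prefixSuffixString.1) (pvDiffWitness_prefixSuffixString.2) ∧ D_prefixSuffixString (pvDiffWitness_prefixSuffixString.1) (pvDiffWitness_prefixSuffixString.2) ∧ prefixSuffixString (pvDiffWitness_prefixSuffixString.1) (pvDiffWitness_prefixSuffixString.2) = pvDiffWitnessOut_prefixSuffixString.1 ∧ prefixSuffixString_alt (pvDiffWitness_prefixSuffixString.1) (pvDiffWitness_prefixSuffixString.2) = pvDiffWitnessOut_prefixSuffixString.2 ∧ pvDiffWitnessOut_prefixSuffixString.1 ≠ pvDiffWitnessOut_prefixSuffixString.2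
def Claim_exact_prefixSuffixString : Prop := ∀ (s1 : List String) (s2 : List String), Dom_prefixSuffixString s1 s2 → Pre_prefixSuffixString s1 s2 → D_prefixSuffixString s1 s2 → prefixSuffixString s1 s2 ≠ prefixSuffixString_alt s1 s2

-- ===== LEMMAS AND PROOFS =====

-- nonempty prefixes of c :: cs
theorem pvPrefix_cons {t : List Char} {c : Char} {cs : List Char} :
    (t ≠ [] ∧ t <+: c :: cs) ↔ ∃ t', t = c :: t' ∧ t' <+: cs := by
  cases t with
  | nil => simp
  | cons a as => simp [List.cons_prefix_cons, eq_comm, and_comm]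

-- node paths after inserting one word: the old nodes plus the path of every nonempty prefix
theorem pvInsert_mem (cs : List Char) (nodes : List (List Nat)) (cur p : List Nat) :
    p ∈ pvInsert nodes cur cs ↔
      p ∈ nodes ∨ ∃ t : List Char, t ≠ [] ∧ t <+: cs ∧ p = cur ++ t.map pvIdx := by
  induction cs generalizing nodes cur with
  | nil =>
    simp only [pvInsert]
    constructor
    · exact Or.inl
    · rintro (h | ⟨t, ht, hp, _⟩)
      · exact h
      · cases t <;> simp_all
  | cons c cs ih =>
    simp only [pvInsert]
    split_ifs with hmem
    · rw [ih]
      constructor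
      · rintro (h | ⟨t', ht', hpre, hp⟩)
        · exact Or.inl h
        · exact Or.inr ⟨c :: t', by simp, by simp [List.cons_prefix_cons, hpre], by simpa using hp⟩
      · rintro (h | ⟨t, ht, hpre, hp⟩)
        · exact Or.inl h
        · rcases pvPrefix_cons.mp ⟨ht, hpre⟩ with ⟨t', rfl, ht'⟩
          cases t' with
          | nil => subst hp; simpa using hmem
          | cons a as => exact Or.inr ⟨a :: as, by simp, ht', by simpa using hp⟩
    · rw [ih]
      constructor
      · rintro (h | ⟨t', ht', hpre, hp⟩)
        · rcases List.mem_append.mp h with h | h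
          · exact Or.inl h
          · simp at h
            exact Or.inr ⟨[c], by simp, ⟨cs, rfl⟩, by simpa using h⟩
        · exact Or.inr ⟨c :: t', by simp, by simp [List.cons_prefix_cons, hpre], by simpa using hp⟩
      · rintro (h | ⟨t, ht, hpre, hp⟩)
        · exact Or.inl (List.mem_append.mpr (Or.inl h))
        · rcases pvPrefix_cons.mp ⟨ht, hpre⟩ with ⟨t', rfl, ht'⟩
          cases t' with
          | nil => exact Or.inl (by simp_all)
          | cons a as => exact Or.inr ⟨a :: as, by simp, ht', by simpa using hp⟩

-- find succeeds iff every nonempty prefix's path is a node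
theorem pvFind_iff (cs : List Char) (nodes : List (List Nat)) (cur : List Nat) :
    pvFind nodes cur cs = true ↔
      ∀ t : List Char, t ≠ [] → t <+: cs → cur ++ t.map pvIdx ∈ nodes := by
  induction cs generalizing cur with
  | nil =>
    simp only [pvFind]
    constructor
    · intro _ t ht hpre
      cases t <;> simp_all
    · intro _; trivial
  | cons c cs ih =>
    simp only [pvFind]
    split_ifs with hmem
    · rw [ih]
      constructor
      · intro h t ht hpre
        rcases pvPrefix_cons.mp ⟨ht, hpre⟩ with ⟨t', rfl, ht'⟩
        cases t' with
        | nil => simpa using hmem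
        | cons a as => simpa using h (a :: as) (by simp) ht'
      · intro h t' ht' hpre
        simpa using h (c :: t') (by simp) (by simp [List.cons_prefix_cons, hpre])
    · simp only [false_iff]
      intro h
      exact hmem (by simpa using h [c] (by simp) ⟨cs, rfl⟩)

-- node paths of the trie built from all words (g w)
theorem pvTrie_mem (g : String → List Char) (ws : List String) (nodes : List (List Nat))
    (p : List Nat) :
    p ∈ ws.foldl (fun n w => pvInsert n [] (g w)) nodes ↔
      p ∈ nodes ∨ ∃ w ∈ ws, ∃ t : List Char, t ≠ [] ∧ t <+: g w ∧ p = t.map pvIdx := by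
  induction ws generalizing nodes with
  | nil => simp
  | cons w ws ih =>
    simp only [List.foldl_cons, ih, pvInsert_mem]
    constructor
    · rintro ((h | ⟨t, ht, hpre, hp⟩) | ⟨w', hw', ht⟩)
      · exact Or.inl h
      · exact Or.inr ⟨w, by simp, t, ht, hpre, by simpa using hp⟩
      · exact Or.inr ⟨w', by simp [hw'], ht⟩
    · rintro (h | ⟨w', hw', t, ht, hpre, hp⟩)
      · exact Or.inl (Or.inl h)
      · rcases List.mem_cons.mp hw' with rfl | hw'
        · exact Or.inl (Or.inr ⟨t, ht, hpre, by simpa using hp⟩)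
        · exact Or.inr ⟨w', hw', t, ht, hpre, hp⟩

-- find on the built trie = the query's slot word is empty or a prefix of some word's
theorem pvFind_trie_idx (g : String → List Char) (ws : List String) (q : List Char) :
    pvFind (ws.foldl (fun n w => pvInsert n [] (g w)) [[]]) [] q = true ↔
      (q = [] ∨ ∃ w ∈ ws, q.map pvIdx <+: (g w).map pvIdx) := by
  rw [pvFind_iff]
  constructor
  · intro h
    by_cases hq0 : q = []
    · exact Or.inl hq0
    · have hmem := h q hq0 List.prefix_rfl
      rw [pvTrie_mem] at hmem
      rcases hmem with h0 | ⟨w, hw, t, ht, hpre, hp⟩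
      · simp only [List.mem_singleton, List.nil_append] at h0
        exact absurd (List.map_eq_nil_iff.mp h0) hq0
      · refine Or.inr ⟨w, hw, ?_⟩
        rw [List.nil_append] at hp
        rw [hp]
        exact hpre.map pvIdx
  · rintro (rfl | ⟨w, hw, hpre⟩) t ht hpre'
    · cases t <;> simp_all
    · rw [pvTrie_mem]
      right
      refine ⟨w, hw, (g w).take t.length, ?_, List.take_prefix _ _, ?_⟩
      · have h1 : t.length ≤ (g w).length := by
          have := (hpre'.map pvIdx).trans hpre
          simpa using this.length_le
        intro hnil
        rw [List.take_eq_nil_iff] at hnil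
        cases hnil with
        | inl h' => exact ht (List.eq_nil_of_length_eq_zero h')
        | inr h' =>
          have h0 : t.length = 0 := by rw [h'] at h1; simpa using h1
          exact ht (List.eq_nil_of_length_eq_zero h0)
      · have h2 : t.map pvIdx <+: (g w).map pvIdx := (hpre'.map pvIdx).trans hpre
        rw [List.nil_append, List.prefix_iff_eq_take.mp h2, ← List.map_take]
        congr 1
        simp

-- A's whole counted condition for one query, semantically
theorem pvA_iff (s1 : List String) (q : String) :
    (pvFind (s1.foldl (fun n (w : String) => pvInsert n [] w.toList) [[]]) [] q.toList = true ∨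
     pvFind (s1.foldl (fun n (w : String) => pvInsert n [] w.toList.reverse) [[]]) []
       q.toList.reverse = true) ↔
    (q.toList = [] ∨ ∃ w ∈ s1, (q.toList.map pvIdx <+: w.toList.map pvIdx ∨
       q.toList.reverse.map pvIdx <+: w.toList.reverse.map pvIdx)) := by
  rw [pvFind_trie_idx String.toList s1 q.toList,
      pvFind_trie_idx (fun w => w.toList.reverse) s1 q.toList.reverse]
  constructor
  · rintro ((h0 | ⟨w, hw, hp⟩) | (h0 | ⟨w, hw, hp⟩))
    · exact Or.inl h0
    · exact Or.inr ⟨w, hw, Or.inl hp⟩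
    · exact Or.inl (by simpa using h0)
    · exact Or.inr ⟨w, hw, Or.inr hp⟩
  · rintro (h0 | ⟨w, hw, hp | hp⟩)
    · exact Or.inl (Or.inl h0)
    · exact Or.inl (Or.inr ⟨w, hw, hp⟩)
    · exact Or.inr (Or.inr ⟨w, hw, hp⟩)

-- B side: membership in the two sets after the inner loop over one string …
theorem pvInner_mem (L : List Char) (n : Nat) (acc : PySem.Set String × PySem.Set String) (q : String) :
    (q ∈ ((List.range n).foldl
        (fun (acc : PySem.Set String × PySem.Set String) i =>
          (PySem.Set.add acc.1 (String.ofList (L.take (i + 1))),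
           PySem.Set.add acc.2 (String.ofList (L.drop i)))) acc).1
      ↔ q ∈ acc.1 ∨ ∃ i < n, q = String.ofList (L.take (i + 1))) ∧
    (q ∈ ((List.range n).foldl
        (fun (acc : PySem.Set String × PySem.Set String) i =>
          (PySem.Set.add acc.1 (String.ofList (L.take (i + 1))),
           PySem.Set.add acc.2 (String.ofList (L.drop i)))) acc).2
      ↔ q ∈ acc.2 ∨ ∃ i < n, q = String.ofList (L.drop i)) := by
  induction n with
  | zero => simp
  | succ n ih =>
    rw [List.range_succ]
    simp only [List.foldl_append, List.foldl_cons, List.foldl_nil]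
    constructor
    · rw [PySem.Set.mem_add, ih.1]
      constructor
      · rintro ((h | ⟨i, hi, rfl⟩) | rfl)
        · exact Or.inl h
        · exact Or.inr ⟨i, by omega, rfl⟩
        · exact Or.inr ⟨n, by omega, rfl⟩
      · rintro (h | ⟨i, hi, rfl⟩)
        · exact Or.inl (Or.inl h)
        · rcases Nat.lt_succ_iff_lt_or_eq.mp hi with hi | rfl
          · exact Or.inl (Or.inr ⟨i, hi, rfl⟩)
          · exact Or.inr rfl
    · rw [PySem.Set.mem_add, ih.2]
      constructor
      · rintro ((h | ⟨i, hi, rfl⟩) | rfl)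
        · exact Or.inl h
        · exact Or.inr ⟨i, by omega, rfl⟩
        · exact Or.inr ⟨n, by omega, rfl⟩
      · rintro (h | ⟨i, hi, rfl⟩)
        · exact Or.inl (Or.inl h)
        · rcases Nat.lt_succ_iff_lt_or_eq.mp hi with hi | rfl
          · exact Or.inl (Or.inr ⟨i, hi, rfl⟩)
          · exact Or.inr rfl

-- … and after the outer loop over all of s1
theorem pvSets_mem (ws : List String) (acc : PySem.Set String × PySem.Set String) (q : String) :
    (q ∈ (ws.foldl
        (fun (acc : PySem.Set String × PySem.Set String) s =>
          (List.range s.toList.length).foldl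
            (fun (acc : PySem.Set String × PySem.Set String) i =>
              (PySem.Set.add acc.1 (String.ofList (s.toList.take (i + 1))),
               PySem.Set.add acc.2 (String.ofList (s.toList.drop i)))) acc) acc).1
      ↔ q ∈ acc.1 ∨ ∃ s ∈ ws, ∃ i < s.toList.length, q = String.ofList (s.toList.take (i + 1))) ∧
    (q ∈ (ws.foldl
        (fun (acc : PySem.Set String × PySem.Set String) s =>
          (List.range s.toList.length).foldl
            (fun (acc : PySem.Set String × PySem.Set String) i =>
              (PySem.Set.add acc.1 (String.ofList (s.toList.take (i + 1))),
               PySem.Set.add acc.2 (String.ofList (s.toList.drop i)))) acc) acc).2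
      ↔ q ∈ acc.2 ∨ ∃ s ∈ ws, ∃ i < s.toList.length, q = String.ofList (s.toList.drop i)) := by
  induction ws generalizing acc with
  | nil => simp
  | cons w ws ih =>
    simp only [List.foldl_cons]
    constructor
    · rw [(ih _).1, (pvInner_mem w.toList w.toList.length acc q).1]
      constructor
      · rintro ((h | h) | ⟨s, hs, h⟩)
        · exact Or.inl h
        · exact Or.inr ⟨w, by simp, h⟩
        · exact Or.inr ⟨s, by simp [hs], h⟩
      · rintro (h | ⟨s, hs, h⟩)
        · exact Or.inl (Or.inl h)
        · rcases List.mem_cons.mp hs with rfl | hs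
          · exact Or.inl (Or.inr h)
          · exact Or.inr ⟨s, hs, h⟩
    · rw [(ih _).2, (pvInner_mem w.toList w.toList.length acc q).2]
      constructor
      · rintro ((h | h) | ⟨s, hs, h⟩)
        · exact Or.inl h
        · exact Or.inr ⟨w, by simp, h⟩
        · exact Or.inr ⟨s, by simp [hs], h⟩
      · rintro (h | ⟨s, hs, h⟩)
        · exact Or.inl (Or.inl h)
        · rcases List.mem_cons.mp hs with rfl | hs
          · exact Or.inl (Or.inr h)
          · exact Or.inr ⟨s, hs, h⟩

-- the inner loop's take-slices are exactly the nonempty prefixes …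
theorem pvTake_iff (q : String) (L : List Char) :
    (∃ i < L.length, q = String.ofList (L.take (i + 1))) ↔ (q.toList ≠ [] ∧ q.toList <+: L) := by
  constructor
  · rintro ⟨i, hi, rfl⟩
    refine ⟨?_, by simpa [String.toList_ofList] using List.take_prefix (i + 1) L⟩
    intro hnil
    rw [String.toList_ofList, List.take_eq_nil_iff] at hnil
    rcases hnil with h | h <;> simp_all
  · rintro ⟨hne, hpre⟩
    refine ⟨q.toList.length - 1, ?_, ?_⟩
    · have := hpre.length_le
      have : q.toList.length ≠ 0 := by simpa using hne
      omega
    · have h1 : q.toList.length - 1 + 1 = q.toList.length := by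
        have : q.toList.length ≠ 0 := by simpa using hne
        omega
      rw [h1, ← List.prefix_iff_eq_take.mp hpre, String.ofList_toList]

-- … and the drop-slices exactly the nonempty suffixes
theorem pvDrop_iff (q : String) (L : List Char) :
    (∃ i < L.length, q = String.ofList (L.drop i)) ↔ (q.toList ≠ [] ∧ q.toList <:+ L) := by
  constructor
  · rintro ⟨i, hi, rfl⟩
    refine ⟨?_, by simpa [String.toList_ofList] using List.drop_suffix i L⟩
    intro hnil
    rw [String.toList_ofList] at hnil
    have hlen := congrArg List.length hnil
    rw [List.length_drop] at hlen
    simp at hlen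
    omega
  · rintro ⟨hne, hsuf⟩
    refine ⟨L.length - q.toList.length, ?_, ?_⟩
    · have := hsuf.length_le
      have : q.toList.length ≠ 0 := by simpa using hne
      omega
    · rw [← List.suffix_iff_eq_drop.mp hsuf, String.ofList_toList]

-- B's whole counted condition for one query, semantically
theorem pvB_iff (s1 : List String) (q : String) :
    ((q = "" ∨ ∃ s ∈ s1, ∃ i < s.toList.length, q = String.ofList (s.toList.take (i + 1))) ∨
     (q = "" ∨ ∃ s ∈ s1, ∃ i < s.toList.length, q = String.ofList (s.toList.drop i))) ↔
    (q.toList = [] ∨ ∃ w ∈ s1, q.toList ≠ [] ∧ (q.toList <+: w.toList ∨ q.toList <:+ w.toList)) := by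
  have hempty : q = "" ↔ q.toList = [] := by
    constructor
    · rintro rfl; rfl
    · intro h; rw [← String.ofList_toList (s := q), h]
  constructor
  · rintro ((h0 | ⟨w, hw, hp⟩) | (h0 | ⟨w, hw, hp⟩))
    · exact Or.inl (hempty.mp h0)
    · have h1 := (pvTake_iff q w.toList).mp hp
      exact Or.inr ⟨w, hw, h1.1, Or.inl h1.2⟩
    · exact Or.inl (hempty.mp h0)
    · have h1 := (pvDrop_iff q w.toList).mp hp
      exact Or.inr ⟨w, hw, h1.1, Or.inr h1.2⟩
  · rintro (h0 | ⟨w, hw, hne, hp | hp⟩)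
    · exact Or.inl (Or.inl (hempty.mpr h0))
    · exact Or.inl (Or.inr ⟨w, hw, (pvTake_iff q w.toList).mpr ⟨hne, hp⟩⟩)
    · exact Or.inr (Or.inr ⟨w, hw, (pvDrop_iff q w.toList).mpr ⟨hne, hp⟩⟩)

-- mod-26 congruence of the character codes is exactly equality of trie slots
theorem pvMod_prefix_iff (q w : List Char) :
    q.map (fun c => c.toNat % 26) <+: w.map (fun c => c.toNat % 26) ↔
      q.map pvIdx <+: w.map pvIdx := by
  induction q generalizing w with
  | nil => simp
  | cons c cs ih =>
    cases w with
    | nil => simp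
    | cons d ds =>
      simp only [List.map_cons, List.cons_prefix_cons, ih]
      constructor
      · rintro ⟨h1, h2⟩
        exact ⟨by unfold pvIdx; omega, h2⟩
      · rintro ⟨h1, h2⟩
        exact ⟨by unfold pvIdx at h1; omega, h2⟩

-- D_ in terms of the ports' slot map and reversed-word prefixes
theorem pvD_iff (s1 s2 : List String) :
    D_prefixSuffixString s1 s2 ↔
      ∃ q ∈ s2,
        (∃ w ∈ s1, (q.toList.map pvIdx <+: w.toList.map pvIdx ∨
          q.toList.reverse.map pvIdx <+: w.toList.reverse.map pvIdx)) ∧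
        ∀ w ∈ s1, ¬ q.toList <+: w.toList ∧ ¬ q.toList.reverse <+: w.toList.reverse := by
  unfold D_prefixSuffixString pvSlots
  constructor
  · rintro ⟨q, hq, w, hw, hm, hlit⟩
    refine ⟨q, hq, ⟨w, hw, ?_⟩, fun v hv => ⟨(hlit v hv).1, ?_⟩⟩
    · rcases hm with hm | hm
      · exact Or.inl ((pvMod_prefix_iff _ _).mp hm)
      · refine Or.inr ((pvMod_prefix_iff _ _).mp ?_)
        rw [List.map_reverse, List.map_reverse]
        exact List.reverse_prefix.mpr hm
    · intro hp
      exact (hlit v hv).2 (List.reverse_prefix.mp hp)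
  · rintro ⟨q, hq, ⟨w, hw, hm⟩, hlit⟩
    refine ⟨q, hq, w, hw, ?_, fun v hv => ⟨(hlit v hv).1, ?_⟩⟩
    · rcases hm with hm | hm
      · exact Or.inl ((pvMod_prefix_iff _ _).mpr hm)
      · refine Or.inr (List.reverse_prefix.mp ?_)
        have h3 := (pvMod_prefix_iff _ _).mpr hm
        rw [List.map_reverse, List.map_reverse] at h3
        exact h3
    · intro hp
      exact (hlit v hv).2 (List.reverse_prefix.mpr hp)

-- a literal match is in particular a slot (wrapped) match
theorem pvLit_to_wrap {s1 : List String} {q : String}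
    (h : ∃ w ∈ s1, q.toList ≠ [] ∧ (q.toList <+: w.toList ∨ q.toList <:+ w.toList)) :
    ∃ w ∈ s1, (q.toList.map pvIdx <+: w.toList.map pvIdx ∨
      q.toList.reverse.map pvIdx <+: w.toList.reverse.map pvIdx) := by
  obtain ⟨w, hw, _, hp | hp⟩ := h
  · exact ⟨w, hw, Or.inl (hp.map pvIdx)⟩
  · exact ⟨w, hw, Or.inr ((List.reverse_prefix.mpr hp).map pvIdx)⟩

-- strict counting: if p dominates q pointwise and beats it somewhere, countP is larger
theorem pvCountP_lt (p q : String → Bool) (l : List String)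
    (h : ∀ x ∈ l, q x = true → p x = true)
    (x : String) (hx : x ∈ l) (hp : p x = true) (hq : q x = false) :
    l.countP q < l.countP p := by
  induction l with
  | nil => simp at hx
  | cons a as ih =>
    rcases List.mem_cons.mp hx with rfl | hx'
    · have hmono : as.countP q ≤ as.countP p :=
        List.countP_mono_left (fun y hy => h y (by simp [hy]))
      rw [List.countP_cons, List.countP_cons]
      simp only [hp, hq, if_false, Bool.false_eq_true, add_zero, if_pos]
      omega
    · rw [List.countP_cons, List.countP_cons]
      have := ih (fun y hy => h y (by simp [hy])) hx'
      have hqa : (if q a = true then 1 else 0) ≤ (if p a = true then 1 else 0) := by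
        by_cases h1 : q a = true
        · rw [h1, h a (by simp) h1]
        · simp [h1]
      omega

-- ===== VERDICT (by name: the statement is the Claim_ definition above) =====
theorem prefixSuffixString_spec : Claim_unchanged_prefixSuffixString := by
  intro s1 s2 _ _
  unfold Spec_prefixSuffixString
  intro hND
  unfold prefixSuffixString prefixSuffixString_alt
  rw [pvD_iff] at hND
  have himp : ∀ q ∈ s2,
      (∃ w ∈ s1, (q.toList.map pvIdx <+: w.toList.map pvIdx ∨
        q.toList.reverse.map pvIdx <+: w.toList.reverse.map pvIdx)) →
      ∃ w ∈ s1, (q.toList <+: w.toList ∨ q.toList.reverse <+: w.toList.reverse) := by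
    intro q hq hwm
    by_contra hlm
    push Not at hlm
    exact hND ⟨q, hq, hwm, fun w hw => hlm w hw⟩
  simp only
  rw [PySem.List.foldl_prod_mk
      (f := fun n (it : String) => pvInsert n [] it.toList)
      (g := fun n (it : String) => pvInsert n [] it.toList.reverse)]
  simp only
  have hcount := PySem.List.foldl_count_if
      (fun (it : String) =>
        pvFind (s1.foldl (fun n (w : String) => pvInsert n [] w.toList) [[]]) [] it.toList ||
        pvFind (s1.foldl (fun n (w : String) => pvInsert n [] w.toList.reverse) [[]]) []
          it.toList.reverse) s2 0
  rw [hcount, zero_add]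
  congr 1
  apply List.countP_congr
  intro it hit
  rw [Bool.or_eq_true, Bool.or_eq_true, PySem.Set.contains_iff, PySem.Set.contains_iff]
  rw [(pvSets_mem s1 _ it).1, (pvSets_mem s1 _ it).2]
  have hinit : (it ∈ PySem.Set.ofList [""]) ↔ it = "" := by
    rw [PySem.Set.mem_ofList]; simp
  rw [hinit]
  rw [pvA_iff s1 it, pvB_iff s1 it]
  constructor
  · rintro (h0 | hwm)
    · exact Or.inl h0
    · by_cases hE : it.toList = []
      · exact Or.inl hE
      · obtain ⟨w, hw, hp | hp⟩ := himp it hit hwm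
        · exact Or.inr ⟨w, hw, hE, Or.inl hp⟩
        · exact Or.inr ⟨w, hw, hE, Or.inr (List.reverse_prefix.mp hp)⟩
  · rintro (h0 | hlit)
    · exact Or.inl h0
    · exact Or.inr (pvLit_to_wrap hlit)

theorem prefixSuffixString_changed : Claim_changed_prefixSuffixString := by
  unfold Claim_changed_prefixSuffixString
  decide

theorem prefixSuffixString_tight : Claim_exact_prefixSuffixString := by
  intro s1 s2 _ _ hD
  unfold prefixSuffixString prefixSuffixString_alt
  rw [pvD_iff] at hD
  simp only
  rw [PySem.List.foldl_prod_mk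
      (f := fun n (it : String) => pvInsert n [] it.toList)
      (g := fun n (it : String) => pvInsert n [] it.toList.reverse)]
  simp only
  have hcount := PySem.List.foldl_count_if
      (fun (it : String) =>
        pvFind (s1.foldl (fun n (w : String) => pvInsert n [] w.toList) [[]]) [] it.toList ||
        pvFind (s1.foldl (fun n (w : String) => pvInsert n [] w.toList.reverse) [[]]) []
          it.toList.reverse) s2 0
  rw [hcount, zero_add]
  obtain ⟨q0, hq0, hwm, hnolit⟩ := hD
  have hAq : (pvFind (s1.foldl (fun n (w : String) => pvInsert n [] w.toList) [[]]) []
        q0.toList ||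
      pvFind (s1.foldl (fun n (w : String) => pvInsert n [] w.toList.reverse) [[]]) []
        q0.toList.reverse) = true := by
    rw [Bool.or_eq_true, pvA_iff s1 q0]
    exact Or.inr hwm
  have hE : q0.toList ≠ [] := by
    intro h0
    obtain ⟨w, hw, _⟩ := hwm
    exact (hnolit w hw).1 (by rw [h0]; exact List.nil_prefix)
  have hBq : (fun q => PySem.Set.contains (s1.foldl
      (fun (acc : PySem.Set String × PySem.Set String) s =>
        (List.range s.toList.length).foldl
          (fun (acc : PySem.Set String × PySem.Set String) i =>
            (PySem.Set.add acc.1 (String.ofList (s.toList.take (i + 1))),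
             PySem.Set.add acc.2 (String.ofList (s.toList.drop i))))
          acc)
      (PySem.Set.ofList [""], PySem.Set.ofList [""])).1 q || PySem.Set.contains (s1.foldl
      (fun (acc : PySem.Set String × PySem.Set String) s =>
        (List.range s.toList.length).foldl
          (fun (acc : PySem.Set String × PySem.Set String) i =>
            (PySem.Set.add acc.1 (String.ofList (s.toList.take (i + 1))),
             PySem.Set.add acc.2 (String.ofList (s.toList.drop i))))
          acc)
      (PySem.Set.ofList [""], PySem.Set.ofList [""])).2 q) q0 = false := by
    rw [Bool.eq_false_iff]
    intro htrue
    simp only at htrue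
    rw [Bool.or_eq_true, PySem.Set.contains_iff, PySem.Set.contains_iff,
      (pvSets_mem s1 _ q0).1, (pvSets_mem s1 _ q0).2] at htrue
    have hinit : (q0 ∈ PySem.Set.ofList [""]) ↔ q0 = "" := by
      rw [PySem.Set.mem_ofList]; simp
    rw [hinit] at htrue
    rcases (pvB_iff s1 q0).mp htrue with h0 | ⟨w, hw, _, hp | hp⟩
    · exact hE h0
    · exact (hnolit w hw).1 hp
    · exact (hnolit w hw).2 (List.reverse_prefix.mpr hp)
  have hdom : ∀ x ∈ s2, (fun q => PySem.Set.contains (s1.foldl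
      (fun (acc : PySem.Set String × PySem.Set String) s =>
        (List.range s.toList.length).foldl
          (fun (acc : PySem.Set String × PySem.Set String) i =>
            (PySem.Set.add acc.1 (String.ofList (s.toList.take (i + 1))),
             PySem.Set.add acc.2 (String.ofList (s.toList.drop i))))
          acc)
      (PySem.Set.ofList [""], PySem.Set.ofList [""])).1 q || PySem.Set.contains (s1.foldl
      (fun (acc : PySem.Set String × PySem.Set String) s =>
        (List.range s.toList.length).foldl
          (fun (acc : PySem.Set String × PySem.Set String) i =>
            (PySem.Set.add acc.1 (String.ofList (s.toList.take (i + 1))),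
             PySem.Set.add acc.2 (String.ofList (s.toList.drop i))))
          acc)
      (PySem.Set.ofList [""], PySem.Set.ofList [""])).2 q) x = true →
      (fun (it : String) =>
        pvFind (s1.foldl (fun n (w : String) => pvInsert n [] w.toList) [[]]) [] it.toList ||
        pvFind (s1.foldl (fun n (w : String) => pvInsert n [] w.toList.reverse) [[]]) []
          it.toList.reverse) x = true := by
    intro x _ hx
    simp only at hx ⊢
    rw [Bool.or_eq_true, PySem.Set.contains_iff, PySem.Set.contains_iff,
      (pvSets_mem s1 _ x).1, (pvSets_mem s1 _ x).2] at hx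
    have hinit : (x ∈ PySem.Set.ofList [""]) ↔ x = "" := by
      rw [PySem.Set.mem_ofList]; simp
    rw [hinit] at hx
    rw [Bool.or_eq_true, pvA_iff s1 x]
    rcases (pvB_iff s1 x).mp hx with h0 | hlit
    · exact Or.inl h0
    · exact Or.inr (pvLit_to_wrap hlit)
  have hlt := pvCountP_lt _ _ s2 hdom q0 hq0 hAq hBq
  intro heq
  rw [Int.natCast_inj] at heq
  omega
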